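-- pv_equiv track=rewrite | github.com/Khushal-Rathod-7035/Learning | Coding/HackerRank/3 Months Preparation Kit/Week 5/grid-challenge.py | gridChallenge
-- ===== SOURCE A (Python) =====
-- def gridChallenge(grid):
--     len_grid = len(grid)
--     len_col = len(grid[0])
--     for i in range(len_grid):
--         grid[i] = ''.join(sorted(grid[i]))
--     columns = []
--     for i in range(len_col):
--         current_col = ''
--         for j in range(len_grid):
--             current_str = grid[j]
--             current_col += current_str[i]
--         columns.append(current_col)
--     return_flag = True
--     for i in columns:
--         if i == ''.join(sorted(i)):
--             continue
--         else:
--             return_flag = False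
--             break
--     if return_flag:
--         return 'YES'
--     else:
--         return 'NO'
-- ===== SOURCE B (Python) =====
-- def gridChallenge(grid):
--     for i in range(len(grid)):
--         grid[i] = ''.join(sorted(grid[i]))
--     w = len(grid[0])
--     for j in range(len(grid) - 1):
--         for i in range(w):
--             if grid[j][i] > grid[j + 1][i]:
--                 return 'NO'
--     return 'YES'
-- ===== Notes on version B (the rewrite author's own statement) =====
-- stated objective: simpler
-- what changed: B keeps the in-place row sorting but drops A's column-building and per-column re-sort: it checks column order directly with one adjacency scan over consecutive row pairs, returning early on the first violation.
import Mathlib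
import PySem

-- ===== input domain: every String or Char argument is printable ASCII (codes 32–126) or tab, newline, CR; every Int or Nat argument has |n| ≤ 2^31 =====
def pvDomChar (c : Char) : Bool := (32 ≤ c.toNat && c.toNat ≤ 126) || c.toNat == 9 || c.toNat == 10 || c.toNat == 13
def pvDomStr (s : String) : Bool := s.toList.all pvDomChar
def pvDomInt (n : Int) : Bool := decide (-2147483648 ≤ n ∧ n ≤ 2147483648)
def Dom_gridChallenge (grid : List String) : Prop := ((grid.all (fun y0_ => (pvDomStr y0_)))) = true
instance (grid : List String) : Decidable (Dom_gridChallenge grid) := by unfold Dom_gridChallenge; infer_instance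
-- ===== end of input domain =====

-- B replaces A's column-building-and-re-sort pass by a direct adjacency scan over consecutive
-- sorted rows (objective: simpler). Both A and B mutate the caller's list in place identically
-- (each row replaced by its sorted form); the equivalence proved here is about the return value.


-- ===== PORT A =====
-- ''.join(sorted(s)) — Python sorts the characters by code point (shared by both ports,
-- since both Pythons contain this identical row-sorting line)
def pvSortRow (cs : List Char) : List Char := PySem.List.sorted cs (fun c => c.toNat) false

def gridChallenge (grid : List String) : String :=
  -- len_col = len(grid[0]); grid[0] raises IndexError on empty grid — excluded by Pre_
  let lenCol := ((grid.getD 0 "").toList).length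
  -- for i in range(len_grid): grid[i] = ''.join(sorted(grid[i]))
  let rows := grid.map (fun s => pvSortRow s.toList)
  -- column building: current_str[i] raises IndexError on rows shorter than grid[0] — excluded
  -- by Pre_, so the default ' ' is never read under Pre_
  let columns := (List.range lenCol).map (fun i => rows.map (fun r => r.getD i ' '))
  -- for i in columns: if i == ''.join(sorted(i)) continue else flag = False, break
  let returnFlag := columns.all (fun col => decide (col = pvSortRow col))
  if returnFlag then "YES" else "NO"

-- ===== PORT B =====
-- inner loop: for i in range(w): if grid[j][i] > grid[j+1][i] → violation (default never read under Pre_)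
def pvPairOK (r1 r2 : List Char) (w : Nat) : Bool :=
  (List.range w).all (fun i => !decide ((r2.getD i ' ').toNat < (r1.getD i ' ').toNat))

-- outer loop over adjacent row pairs j, j+1, with early exit on a violation
def pvCheckPairs (w : Nat) : List (List Char) → Bool
  | r1 :: r2 :: rest => pvPairOK r1 r2 w && pvCheckPairs w (r2 :: rest)
  | _ => true

def gridChallenge_alt (grid : List String) : String :=
  let rows := grid.map (fun s => pvSortRow s.toList)
  let w := (rows.getD 0 []).length
  if pvCheckPairs w rows then "YES" else "NO"

-- ===== PRECONDITION & SPEC =====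
-- Pre_ excludes exactly the inputs where Python A raises IndexError: the empty grid (grid[0]),
-- and grids containing a row shorter than row 0 (current_str[i] during column building).
def Pre_gridChallenge (grid : List String) : Prop :=
  grid ≠ [] ∧ ∀ s ∈ grid, (grid.getD 0 "").toList.length ≤ s.toList.length
instance (grid : List String) : Decidable (Pre_gridChallenge grid) := by
  unfold Pre_gridChallenge; infer_instance

def pvWitness_gridChallenge : List String := ["abc", "ade", "efg"]

def Spec_gridChallenge (grid : List String) (out : String) : Prop := out = gridChallenge_alt grid
instance (grid : List String) (out : String) : Decidable (Spec_gridChallenge grid out) := by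
  unfold Spec_gridChallenge; infer_instance

-- ===== CLAIM (what is proved, stated in full; the proofs are below) =====
def Claim_equal_gridChallenge : Prop := ∀ (grid : List String), Dom_gridChallenge grid → Pre_gridChallenge grid → Spec_gridChallenge grid (gridChallenge grid)

-- ===== LEMMAS AND PROOFS =====

-- a column equals its own sort iff it is pairwise nondecreasing
lemma pvCol_sorted_iff (col : List Char) :
    col = pvSortRow col ↔ col.Pairwise (fun a b => a.toNat ≤ b.toNat) := by
  constructor
  · intro h
    have := PySem.List.sorted_pairwise col (fun c => c.toNat)
    rw [h]; exact this
  · intro h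
    exact (PySem.List.sorted_eq_self_of_pairwise col (fun c => c.toNat) h).symm

lemma pvPairOK_iff (r1 r2 : List Char) (w : Nat) :
    pvPairOK r1 r2 w = true ↔ ∀ i < w, (r1.getD i ' ').toNat ≤ (r2.getD i ' ').toNat := by
  simp [pvPairOK]

-- pvCheckPairs is the adjacency chain of the pointwise-≤ relation over the rows
lemma pvCheckPairs_iff (w : Nat) (l : List (List Char)) :
    pvCheckPairs w l = true ↔
      l.IsChain (fun r1 r2 => ∀ i < w, (r1.getD i ' ').toNat ≤ (r2.getD i ' ').toNat) := by
  induction l with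
  | nil => simp [pvCheckPairs]
  | cons r1 t ih =>
    cases t with
    | nil => simp [pvCheckPairs]
    | cons r2 rest =>
      rw [List.isChain_cons_cons, ← ih, ← pvPairOK_iff]
      simp [pvCheckPairs]

-- an adjacency chain of an intersection of relations is the intersection of the chains
lemma pvIsChain_forall {α : Type} (w : Nat) (R : Nat → α → α → Prop) (l : List α) :
    l.IsChain (fun a b => ∀ i < w, R i a b) ↔ ∀ i < w, l.IsChain (R i) := by
  induction l with
  | nil => simp
  | cons a t ih =>
    rw [List.isChain_cons]
    constructor
    · rintro ⟨hh, ht⟩ i hi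
      rw [List.isChain_cons]
      exact ⟨fun b hb => hh b hb i hi, (ih.mp ht) i hi⟩
    · intro h
      refine ⟨fun b hb i hi => ?_, ih.mpr fun i hi => ?_⟩
      · exact (List.isChain_cons.mp (h i hi)).1 b hb
      · exact (List.isChain_cons.mp (h i hi)).2

-- the two flags agree: "every column equals its sort" = "every adjacent row pair is pointwise ≤"
lemma pvFlags_eq (rows : List (List Char)) (w : Nat) :
    ((List.range w).map (fun i => rows.map (fun r => r.getD i ' '))).all
        (fun col => decide (col = pvSortRow col)) = pvCheckPairs w rows := by
  rw [Bool.eq_iff_iff, pvCheckPairs_iff, pvIsChain_forall]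
  simp only [List.all_eq_true, List.mem_map, List.mem_range, decide_eq_true_eq]
  constructor
  · intro h i hi
    have hp : (rows.map (fun r : List Char => r.getD i ' ')).Pairwise (fun a b => a.toNat ≤ b.toNat) :=
      (pvCol_sorted_iff _).mp (h _ ⟨i, hi, rfl⟩)
    exact (List.isChain_map (fun r : List Char => r.getD i ' ')).mp
      ((@List.isChain_iff_pairwise _ (fun a b : Char => a.toNat ≤ b.toNat) _ ⟨fun h1 h2 => Nat.le_trans h1 h2⟩).mpr hp)
  · rintro h col ⟨i, hi, rfl⟩
    refine (pvCol_sorted_iff _).mpr ?_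
    have hc : (rows.map (fun r : List Char => r.getD i ' ')).IsChain
        (fun a b => a.toNat ≤ b.toNat) :=
      (List.isChain_map (fun r : List Char => r.getD i ' ')).mpr (h i hi)
    exact (@List.isChain_iff_pairwise _ (fun a b : Char => a.toNat ≤ b.toNat) _ ⟨fun h1 h2 => Nat.le_trans h1 h2⟩).mp hc

-- ===== VERDICT (by name: the statement is the Claim_ definition above) =====
theorem gridChallenge_spec : Claim_equal_gridChallenge := by
  intro grid _ _
  unfold Spec_gridChallenge gridChallenge gridChallenge_alt
  have hw : ((grid.getD 0 "").toList).length = ((grid.map (fun s => pvSortRow s.toList)).getD 0 []).length := by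
    cases grid with
    | nil => simp
    | cons g t => simp [pvSortRow, PySem.List.length_sorted]
  simp only [← hw, pvFlags_eq]
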